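-- pv_equiv track=rewrite | github.com/kaylals/HousingHub | pdf_to_csv.py | clean_and_parse_text
-- ===== SOURCE A (Python) =====
-- def clean_and_parse_text(text):
--     cleaned_data = []
--     lines = text.split('\n')
--
--     for line in lines:
--         # Remove unwanted footer information
--         if 'Matrix' in line or 'https://' in line:
--             continue
--
--         # Extract relevant data, assuming each relevant line has a date at the beginning
--         if line and line[0].isdigit():
--             # Split the line into columns
--             columns = line.split()
--
--             # Initialize an empty list to store the processed columns
--             processed_columns = []
--
--             # Process the columns
--             i = 0
--             while i < len(columns):
--                 if i == 4:  # Address starts at index 4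
--                     # Combine address parts until we reach AreaCity
--                     address_parts = []
--                     while i < len(columns) and not columns[i].endswith('700Seattle'):
--                         address_parts.append(columns[i])
--                         i += 1
--                     processed_columns.append(' '.join(address_parts))
--                     if i < len(columns):
--                         processed_columns.append(columns[i])  # AreaCity
--                         i += 1
--                     else:
--                         processed_columns.append('700Seattle')  # Default AreaCity if not found
--                 else:
--                     processed_columns.append(columns[i])
--                     i += 1
--
--             cleaned_data.append(processed_columns)
--
--     return cleaned_data
-- ===== SOURCE B (Python) =====
-- def clean_and_parse_text(text):
--     result = []
--     for line in text.split('\n'):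
--         if 'Matrix' in line or 'https://' in line or not line or not line[0].isdigit():
--             continue
--         columns = line.split()
--         if len(columns) <= 4:
--             result.append(columns[:])
--             continue
--         head, rest = columns[:4], columns[4:]
--         idx = next((k for k, t in enumerate(rest) if t.endswith('700Seattle')), None)
--         if idx is None:
--             result.append(head + [' '.join(rest), '700Seattle'])
--         else:
--             result.append(head + [' '.join(rest[:idx]), rest[idx]] + rest[idx + 1:])
--     return result
-- ===== Notes on version B (the rewrite author's own statement) =====
-- stated objective: simpler
-- what changed: Replaces A's stateful index-walking while loop (with a nested address-gathering while and manual index bookkeeping) by a slice-based decomposition: take the 4-column head, search the tail once for the first sentinel-suffixed token, and assemble the row from slices.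
import Mathlib
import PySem

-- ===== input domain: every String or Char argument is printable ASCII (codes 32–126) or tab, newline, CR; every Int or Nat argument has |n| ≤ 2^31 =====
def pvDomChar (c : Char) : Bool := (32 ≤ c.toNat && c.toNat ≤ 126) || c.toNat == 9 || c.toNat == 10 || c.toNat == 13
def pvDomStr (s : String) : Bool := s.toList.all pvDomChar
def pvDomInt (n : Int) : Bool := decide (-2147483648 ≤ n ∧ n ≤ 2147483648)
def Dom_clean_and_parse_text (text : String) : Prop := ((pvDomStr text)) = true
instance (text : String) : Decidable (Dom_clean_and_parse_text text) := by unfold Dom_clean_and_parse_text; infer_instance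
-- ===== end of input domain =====

-- B replaces A's index-walking while loop by a slice/search decomposition (take/drop + findIdx?); objective: simpler.

-- ===== PORT A =====
-- the sentinel test columns[i].endswith('700Seattle'), shared by both ports
def isAreaCity (t : String) : Bool := PySem.Str.endswith t "700Seattle"

-- inner while loop gathering address parts: returns (address_parts, final index i)
def gatherA (columns : List String) (i : Nat) : List String × Nat :=
  if _h : i < columns.length then
    if isAreaCity (columns.getD i "") then ([], i)
    else
      let p := gatherA columns (i + 1)
      (columns.getD i "" :: p.1, p.2)
  else ([], i)
termination_by columns.length - i

-- the index never moves backwards (needed only for loopA's termination)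
theorem gatherA_le (columns : List String) (i : Nat) : i ≤ (gatherA columns i).2 := by
  fun_induction gatherA columns i with
  | case1 => simp
  | case2 i h hp p ih => exact Nat.le_of_succ_le ih
  | case3 => simp

-- outer while loop over column indices
def loopA (columns : List String) (i : Nat) : List String :=
  if _h : i < columns.length then
    if i = 4 then
      let p := gatherA columns i
      if _hj : p.2 < columns.length then
        PySem.Str.join " " p.1 :: columns.getD p.2 "" :: loopA columns (p.2 + 1)
      else
        [PySem.Str.join " " p.1, "700Seattle"]
    else
      columns.getD i "" :: loopA columns (i + 1)
  else []
termination_by columns.length - i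
decreasing_by
  · have := gatherA_le columns i; omega
  · omega

def clean_and_parse_text (text : String) : List (List String) :=
  ((PySem.Str.split? text "\n").getD []).foldl (fun acc line =>
    if PySem.Str.isIn "Matrix" line || PySem.Str.isIn "https://" line then acc
    else if (match line.toList with
             | [] => false
             | c :: _ => PySem.Chars.isdigit c) then
      acc ++ [loopA (PySem.Str.split₀ line) 0]
    else acc) []

-- ===== PORT B =====
def keepB (line : String) : Bool :=
  !(PySem.Str.isIn "Matrix" line) && !(PySem.Str.isIn "https://" line) &&
  (match line.toList with
   | [] => false
   | c :: _ => PySem.Chars.isdigit c)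

def parseLineB (columns : List String) : List String :=
  if columns.length ≤ 4 then columns
  else
    let head := columns.take 4
    let rest := columns.drop 4
    match rest.findIdx? (isAreaCity) with
    | none => head ++ [PySem.Str.join " " rest, "700Seattle"]
    | some k => head ++ [PySem.Str.join " " (rest.take k), rest.getD k ""] ++ rest.drop (k + 1)

def clean_and_parse_text_alt (text : String) : List (List String) :=
  ((PySem.Str.split? text "\n").getD []).filterMap (fun line =>
    if keepB line then some (parseLineB (PySem.Str.split₀ line)) else none)

-- ===== PRECONDITION & SPEC =====
def Spec_clean_and_parse_text (text : String) (out : List (List String)) : Prop := out = clean_and_parse_text_alt text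
instance (text : String) (out : List (List String)) : Decidable (Spec_clean_and_parse_text text out) := by unfold Spec_clean_and_parse_text; infer_instance

-- ===== CLAIM (what is proved, stated in full; the proofs are below) =====
def Claim_equal_clean_and_parse_text : Prop := ∀ (text : String), Dom_clean_and_parse_text text → Spec_clean_and_parse_text text (clean_and_parse_text text)

-- ===== LEMMAS AND PROOFS =====

-- past index 4 the outer loop is a plain copy of the remaining columns
theorem loopA_drop (columns : List String) :
    ∀ (n i : Nat), columns.length - i = n → 4 < i → loopA columns i = columns.drop i := by
  intro n
  induction n with
  | zero =>
    intro i h hi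
    rw [loopA]
    have hge : ¬ i < columns.length := by omega
    simp only [hge, dite_false]
    exact (List.drop_eq_nil_of_le (by omega)).symm
  | succ n ih =>
    intro i h hi
    rw [loopA]
    have hlt : i < columns.length := by omega
    have h4 : ¬ i = 4 := by omega
    simp only [hlt, dite_true, h4, if_false]
    rw [ih (i + 1) (by omega) (by omega)]
    rw [List.drop_eq_getElem_cons hlt, List.getD_eq_getElem columns "" hlt]

-- the inner while loop expressed by findIdx? over the suffix
theorem gatherA_spec (columns : List String) :
    ∀ (n i : Nat), columns.length - i = n → i ≤ columns.length →
    gatherA columns i =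
      match (columns.drop i).findIdx? (isAreaCity) with
      | some k => ((columns.drop i).take k, i + k)
      | none => (columns.drop i, columns.length) := by
  intro n
  induction n with
  | zero =>
    intro i h hi
    have hge : ¬ i < columns.length := by omega
    have hd : columns.drop i = [] := List.drop_eq_nil_of_le (by omega)
    rw [gatherA]
    simp only [hge, dite_false, hd, List.findIdx?_nil]
    have : i = columns.length := by omega
    simp [this]
  | succ n ih =>
    intro i h hi
    have hlt : i < columns.length := by omega
    have hd : columns.drop i = columns[i] :: columns.drop (i + 1) := List.drop_eq_getElem_cons hlt
    rw [gatherA]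
    simp only [hlt, dite_true, List.getD_eq_getElem columns "" hlt, hd, List.findIdx?_cons]
    by_cases hp : isAreaCity columns[i]
    · simp [hp]
    · simp only [hp, if_false, Bool.false_eq_true]
      rw [ih (i + 1) (by omega) (by omega)]
      cases hf : (columns.drop (i + 1)).findIdx? (isAreaCity) with
      | none => simp
      | some k =>
        simp only [Option.map_some, List.take_succ_cons]
        have h5 : i + (k + 1) = i + 1 + k := by omega
        simp [h5]

-- the first four indices are copied, then the i = 4 state is reached
theorem loopA_take (columns : List String) :
    ∀ (k i : Nat), i + k = 4 → loopA columns i = (columns.drop i).take k ++ loopA columns 4 := by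
  intro k
  induction k with
  | zero =>
    intro i h
    have : i = 4 := by omega
    simp [this]
  | succ k ih =>
    intro i h
    rw [loopA]
    by_cases hlt : i < columns.length
    · have h4 : ¬ i = 4 := by omega
      simp only [hlt, dite_true, h4, if_false]
      rw [ih (i + 1) (by omega)]
      rw [List.drop_eq_getElem_cons hlt, List.getD_eq_getElem columns "" hlt, List.take_succ_cons]
      simp
    · have h1 : loopA columns 4 = [] := by
        rw [loopA]
        have : ¬ 4 < columns.length := by omega
        simp [this]
      have h2 : columns.drop i = [] := List.drop_eq_nil_of_le (by omega)
      simp [hlt, h1, h2]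

theorem loopA_eq_parseLineB (columns : List String) :
    loopA columns 0 = parseLineB columns := by
  rw [loopA_take columns 4 0 rfl]
  unfold parseLineB
  by_cases h4 : columns.length ≤ 4
  · have hz : loopA columns 4 = [] := by
      rw [loopA]
      have : ¬ 4 < columns.length := by omega
      simp [this]
    simp [h4, hz, List.take_of_length_le h4]
  · have hlt : 4 < columns.length := by omega
    rw [loopA]
    simp only [hlt, dite_true]
    rw [gatherA_spec columns (columns.length - 4) 4 rfl (by omega)]
    simp only [h4, if_false]
    cases hf : (columns.drop 4).findIdx? (isAreaCity) with
    | none =>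
      have : ¬ columns.length < columns.length := by omega
      simp
    | some k =>
      have hk : k < (columns.drop 4).length := by
        rcases List.findIdx?_eq_some_iff_findIdx_eq.mp hf with ⟨h1, _⟩
        exact h1
      have hk' : 4 + k < columns.length := by
        simp [List.length_drop] at hk; omega
      simp only [hk', dite_true]
      rw [loopA_drop columns (columns.length - (4 + k + 1)) (4 + k + 1) rfl (by omega)]
      have hg : columns.getD (4 + k) "" = (columns.drop 4).getD k "" := by
        rw [List.getD_eq_getElem columns "" hk', List.getD_eq_getElem _ "" hk]
        simp
      have hdd : columns.drop (4 + k + 1) = (columns.drop 4).drop (k + 1) := by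
        rw [List.drop_drop]; ring_nf
      rw [hg, hdd]
      simp

-- the outer line loop: append-fold equals filterMap
theorem outer_fold (lines : List String) :
    ∀ (acc : List (List String)),
    lines.foldl (fun acc line =>
      if PySem.Str.isIn "Matrix" line || PySem.Str.isIn "https://" line then acc
      else if (match line.toList with
               | [] => false
               | c :: _ => PySem.Chars.isdigit c) then
        acc ++ [loopA (PySem.Str.split₀ line) 0]
      else acc) acc
    = acc ++ lines.filterMap (fun line =>
        if keepB line then some (parseLineB (PySem.Str.split₀ line)) else none) := by
  induction lines with
  | nil => intro acc; simp
  | cons l ls ih =>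
    intro acc
    rw [List.foldl_cons, List.filterMap_cons, ih]
    unfold keepB
    by_cases h1 : PySem.Chars.isIn ['M','a','t','r','i','x'] l.toList <;>
      by_cases h2 : PySem.Chars.isIn ['h','t','t','p','s',':','/','/'] l.toList <;>
      by_cases h3 : (match l.toList with
                     | [] => false
                     | c :: _ => PySem.Chars.isdigit c) = true <;>
      simp [h1, h2, h3, loopA_eq_parseLineB]

-- ===== VERDICT (by name: the statement is the Claim_ definition above) =====
theorem clean_and_parse_text_spec : Claim_equal_clean_and_parse_text := by
  intro text _
  unfold Spec_clean_and_parse_text clean_and_parse_text clean_and_parse_text_alt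
  rw [outer_fold]
  simp
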